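-- pv_equiv track=rewrite | github.com/jityong/AdventOfCode2020 | solutions/day8.py | find_happy_nodes
-- ===== SOURCE A (Python) =====
-- from collections import defaultdict
--
-- def find_happy_nodes(arr):
--     # Populate reversed edges, key is the node and value are immediate nodes that points to key.
--     accessible_from = defaultdict(lambda: [])
--     for i in range(len(arr)):
--         if i > 0 and arr[i-1][0] != 'jmp':
--             accessible_from[i].append(i-1)
--         if arr[i][0] == 'jmp':
--             accessible_from[i + arr[i][1]].append(i)
--
--     # Using transitive closure / DFS, we find all nodes that can access the last node
--     happy_nodes = set()
--     def dfs(idx):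
--         for i in accessible_from[idx]:
--             if not i in happy_nodes:
--                 happy_nodes.add(i)
--                 dfs(i)
--     dfs(len(arr)-1)
--     return happy_nodes
-- ===== SOURCE B (Python) =====
-- def find_happy_nodes(arr):
--     n = len(arr)
--     # Forward edge of each instruction: where control flow goes next.
--     dest = [i + arr[i][1] if arr[i][0] == 'jmp' else i + 1 for i in range(n)]
--
--     def preds(node):
--         # immediate predecessors of node, in increasing order
--         return [i for i in range(n) if dest[i] == node]
--
--     # Iterative DFS: the front of `stack` is the top; membership is checked
--     # when an index is popped, so each index is added at most once.
--     happy_nodes = set()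
--     stack = preds(n - 1)
--     while stack:
--         i = stack.pop(0)
--         if i not in happy_nodes:
--             happy_nodes.add(i)
--             stack = preds(i) + stack
--     return happy_nodes
-- ===== Notes on version B (the rewrite author's own statement) =====
-- stated objective: alternative
-- what changed: B drops the reverse-edge defaultdict entirely: it precomputes a forward destination table, obtains predecessors of a node by filtering that table, and replaces the recursive dfs by a flat iterative stack loop with visited-check at pop time.
import Mathlib
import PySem

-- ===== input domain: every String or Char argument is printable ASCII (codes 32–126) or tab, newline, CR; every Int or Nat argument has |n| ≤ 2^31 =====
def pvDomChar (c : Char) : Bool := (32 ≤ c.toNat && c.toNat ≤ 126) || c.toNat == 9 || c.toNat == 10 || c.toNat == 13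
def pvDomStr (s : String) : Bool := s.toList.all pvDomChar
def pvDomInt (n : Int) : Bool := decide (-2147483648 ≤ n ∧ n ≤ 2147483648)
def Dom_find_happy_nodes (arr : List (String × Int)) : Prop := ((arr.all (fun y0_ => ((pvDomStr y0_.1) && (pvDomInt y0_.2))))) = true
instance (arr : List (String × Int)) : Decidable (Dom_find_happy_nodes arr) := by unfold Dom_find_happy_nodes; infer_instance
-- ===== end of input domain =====

-- B drops A's reverse-edge dict: it precomputes a forward destination table,
-- finds predecessors by filtering it, and replaces the recursive dfs by a flat
-- iterative stack with the visited check at pop time (same returned set).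
-- Both Pythons mutate only local state, never the argument.

-- ===== PORT A =====
-- A's reverse-edge defaultdict build loop
def pvBuild (arr : List (String × Int)) : PySem.Dict Int (List Int) :=
  (PySem.List.pyRange 0 (arr.length : Int) 1).foldl (fun d i =>
    let d1 := if 0 < i ∧ (PySem.List.pyGetD arr (i-1) ("", 0)).1 ≠ "jmp"
      then d.modify i [] (fun l => l ++ [i-1]) else d
    if (PySem.List.pyGetD arr i ("", 0)).1 = "jmp"
      then d1.modify (i + (PySem.List.pyGetD arr i ("", 0)).2) [] (fun l => l ++ [i])
      else d1) PySem.Dict.empty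

-- A's recursive dfs, inlined on the pending predecessor list; the Nat fuel is a
-- totality device only (never exhausted at the call below)
def pvDfs (d : PySem.Dict Int (List Int)) : Nat → PySem.Set Int → List Int → PySem.Set Int
  | 0, happy, _ => happy
  | f + 1, happy, l =>
    match l with
    | [] => happy
    | i :: rest =>
      if PySem.Set.contains happy i then pvDfs d f happy rest
      else pvDfs d f (pvDfs d f (PySem.Set.add happy i) (d.getD i [])) rest

def find_happy_nodes (arr : List (String × Int)) : List Int :=
  let d := pvBuild arr
  let w := (d.values.flatten).length
  pvDfs d (w * (w + 2) + w + 2) PySem.Set.empty (d.getD ((arr.length : Int) - 1) [])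

-- ===== PORT B =====
-- B's forward destination table: dest[i] = where instruction i hands control
def pvDestF (arr : List (String × Int)) (i : Int) : Int :=
  if (PySem.List.pyGetD arr i ("", 0)).1 = "jmp"
    then i + (PySem.List.pyGetD arr i ("", 0)).2 else i + 1

def pvDest (arr : List (String × Int)) : List Int :=
  (PySem.List.pyRange 0 (arr.length : Int) 1).map (pvDestF arr)

-- B's preds(node): indices whose destination is node, in increasing order
def pvPreds (arr : List (String × Int)) (node : Int) : List Int :=
  (PySem.List.pyRange 0 (arr.length : Int) 1).filter
    (fun i => PySem.List.pyGetD (pvDest arr) i 0 == node)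

-- B's while loop: flat stack, front = top, visited check at pop; the Nat fuel
-- is a totality device only (never exhausted at the call below)
def pvRun (arr : List (String × Int)) : Nat → PySem.Set Int → List Int → PySem.Set Int
  | _, happy, [] => happy
  | 0, happy, _ => happy
  | f + 1, happy, i :: s =>
    if PySem.Set.contains happy i then pvRun arr f happy s
    else pvRun arr f (PySem.Set.add happy i) (pvPreds arr i ++ s)

def find_happy_nodes_alt (arr : List (String × Int)) : List Int :=
  pvRun arr ((arr.length + 2) * (arr.length + 2)) PySem.Set.empty
    (pvPreds arr ((arr.length : Int) - 1))

-- ===== PRECONDITION & SPEC =====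
def Spec_find_happy_nodes (arr : List (String × Int)) (out : List Int) : Prop := out = find_happy_nodes_alt arr
instance (arr : List (String × Int)) (out : List Int) : Decidable (Spec_find_happy_nodes arr out) := by unfold Spec_find_happy_nodes; infer_instance

-- ===== CLAIM (what is proved, stated in full; the proofs are below) =====
def Claim_equal_find_happy_nodes : Prop := ∀ (arr : List (String × Int)), Dom_find_happy_nodes arr → Spec_find_happy_nodes arr (find_happy_nodes arr)

-- ===== LEMMAS AND PROOFS =====

-- ---- step equations ----
lemma pvDfs_nil (d : PySem.Dict Int (List Int)) (f : Nat) (h : PySem.Set Int) :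
    pvDfs d f h [] = h := by cases f <;> rfl

lemma pvDfs_step (d : PySem.Dict Int (List Int)) (f : Nat) (h : PySem.Set Int) (i : Int) (rest : List Int) :
    pvDfs d (f+1) h (i :: rest)
      = if PySem.Set.contains h i then pvDfs d f h rest
        else pvDfs d f (pvDfs d f (PySem.Set.add h i) (d.getD i [])) rest := rfl

lemma pvRun_nil (arr : List (String × Int)) (f : Nat) (h : PySem.Set Int) :
    pvRun arr f h [] = h := by cases f <;> rfl

lemma pvRun_step (arr : List (String × Int)) (f : Nat) (h : PySem.Set Int) (i : Int) (s : List Int) :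
    pvRun arr (f+1) h (i :: s)
      = if PySem.Set.contains h i then pvRun arr f h s
        else pvRun arr f (PySem.Set.add h i) (pvPreds arr i ++ s) := rfl

-- ---- A-side universe, measure and fuel ----
def pvV (d : PySem.Dict Int (List Int)) : Finset Int := (d.values.flatten).toFinset
def pvW (d : PySem.Dict Int (List Int)) : Nat := (d.values.flatten).length
def pvK (d : PySem.Dict Int (List Int)) (h : List Int) : Nat :=
  ((pvV d).filter (fun v => v ∉ h)).card
def pvS (d : PySem.Dict Int (List Int)) : Nat := pvW d * (pvW d + 2) + pvW d + 1
def pvFuelA (d : PySem.Dict Int (List Int)) : Nat := pvW d * (pvW d + 2) + pvW d + 2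

lemma pvMemValues (d : PySem.Dict Int (List Int)) (k : Int) (v : List Int)
    (h : d.get? k = some v) : v ∈ d.values := by
  obtain ⟨items⟩ := d
  induction items with
  | nil => simp [PySem.Dict.get?] at h
  | cons p rest ih =>
    rw [PySem.Dict.get?_mk_cons] at h
    by_cases hk : p.1 == k
    · simp [hk] at h; simp [PySem.Dict.values, ← h]
    · simp [hk] at h
      have := ih h
      simp [PySem.Dict.values] at this ⊢
      tauto

lemma pvPredSubV (d : PySem.Dict Int (List Int)) (i : Int) :
    ∀ x ∈ d.getD i [], x ∈ pvV d := by
  intro x hx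
  rw [PySem.Dict.getD_eq_get?_getD] at hx
  cases hg : d.get? i with
  | none => rw [hg] at hx; simp at hx
  | some v =>
    rw [hg] at hx
    simp only [Option.getD_some] at hx
    have hv := pvMemValues d i v hg
    simp only [pvV, List.mem_toFinset]
    exact List.mem_flatten.2 ⟨v, hv, hx⟩

lemma pvPredLen (d : PySem.Dict Int (List Int)) (i : Int) :
    (d.getD i []).length ≤ pvW d := by
  rw [PySem.Dict.getD_eq_get?_getD]
  cases hg : d.get? i with
  | none => simp [pvW]
  | some v =>
    simp only [Option.getD_some]
    exact (List.sublist_flatten_of_mem (pvMemValues d i v hg)).length_le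

lemma pvKleW (d : PySem.Dict Int (List Int)) (h : List Int) : pvK d h ≤ pvW d :=
  le_trans (Finset.card_filter_le _ _) (List.toFinset_card_le _)

lemma pvGrow (d : PySem.Dict Int (List Int)) :
    ∀ (f : Nat) (h : PySem.Set Int) (l : List Int) (x : Int), x ∈ h → x ∈ pvDfs d f h l := by
  intro f
  induction f with
  | zero => intro h l x hx; exact hx
  | succ f ih =>
    intro h l x hx
    cases l with
    | nil => exact hx
    | cons i rest =>
      rw [pvDfs_step]
      by_cases hc : PySem.Set.contains h i
      · rw [if_pos hc]; exact ih _ _ _ hx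
      · rw [if_neg hc]
        exact ih _ _ _ (ih _ _ _ ((PySem.Set.mem_add h i x).2 (Or.inl hx)))

lemma pvKmono (d : PySem.Dict Int (List Int)) (f : Nat) (h : PySem.Set Int) (l : List Int) :
    pvK d (pvDfs d f h l) ≤ pvK d h := by
  apply Finset.card_le_card
  intro v hv
  simp only [Finset.mem_filter] at hv ⊢
  exact ⟨hv.1, fun hmem => hv.2 (pvGrow d f h l v hmem)⟩

lemma pvKadd (d : PySem.Dict Int (List Int)) (h : PySem.Set Int) (i : Int)
    (hiV : i ∈ pvV d) (hih : i ∉ h) : pvK d (PySem.Set.add h i) + 1 = pvK d h := by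
  have hset : (pvV d).filter (fun v => v ∉ PySem.Set.add h i)
      = ((pvV d).filter (fun v => v ∉ h)).erase i := by
    ext v
    simp only [Finset.mem_filter, Finset.mem_erase, PySem.Set.mem_add]
    tauto
  have hmem : i ∈ (pvV d).filter (fun v => v ∉ h) := by
    simp [Finset.mem_filter, hiV, hih]
  simp only [pvK, hset]
  rw [Finset.card_erase_of_mem hmem]
  have : 0 < ((pvV d).filter (fun v => v ∉ h)).card := Finset.card_pos.2 ⟨i, hmem⟩
  omega

lemma pvKaddExp (d : PySem.Dict Int (List Int)) (h : PySem.Set Int) (i : Int)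
    (hiV : i ∈ pvV d) (hih : i ∉ h) :
    pvK d h * (pvW d + 2) = pvK d (PySem.Set.add h i) * (pvW d + 2) + (pvW d + 2) := by
  rw [← pvKadd d h i hiV hih]; ring

lemma pvFuelIrrel (d : PySem.Dict Int (List Int)) :
    ∀ (f₁ f₂ : Nat) (h : PySem.Set Int) (l : List Int),
      (∀ x ∈ l, x ∈ pvV d) →
      pvK d h * (pvW d + 2) + l.length + 1 ≤ f₁ →
      pvK d h * (pvW d + 2) + l.length + 1 ≤ f₂ →
      pvDfs d f₁ h l = pvDfs d f₂ h l := by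
  intro f₁
  induction f₁ with
  | zero => intro f₂ h l _ h1 _; exact absurd h1 (Nat.not_succ_le_zero _)
  | succ a ih =>
    intro f₂ h l hlV h1 h2
    cases f₂ with
    | zero => exact absurd h2 (Nat.not_succ_le_zero _)
    | succ b =>
      cases l with
      | nil => rw [pvDfs_nil, pvDfs_nil]
      | cons i rest =>
        rw [pvDfs_step, pvDfs_step]
        simp only [List.length_cons] at h1 h2
        by_cases hc : PySem.Set.contains h i
        · rw [if_pos hc, if_pos hc]
          exact ih b h rest (fun x hx => hlV x (List.mem_cons_of_mem _ hx))
            (by linarith) (by linarith)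
        · rw [if_neg hc, if_neg hc]
          have hih : i ∉ h := fun hm => hc ((PySem.Set.contains_iff h i).2 hm)
          have hiV : i ∈ pvV d := hlV i List.mem_cons_self
          have hexp := pvKaddExp d h i hiV hih
          have hpl := pvPredLen d i
          have hsa : pvK d (PySem.Set.add h i) * (pvW d + 2) + (d.getD i []).length + 1 ≤ a := by
            linarith
          have hsb : pvK d (PySem.Set.add h i) * (pvW d + 2) + (d.getD i []).length + 1 ≤ b := by
            linarith
          have hinner : pvDfs d a (PySem.Set.add h i) (d.getD i [])
              = pvDfs d b (PySem.Set.add h i) (d.getD i []) :=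
            ih b (PySem.Set.add h i) (d.getD i []) (pvPredSubV d i) hsa hsb
          rw [hinner]
          set h'' := pvDfs d b (PySem.Set.add h i) (d.getD i []) with hh''
          have hk'' : pvK d h'' ≤ pvK d (PySem.Set.add h i) := pvKmono d b _ _
          have hmul : pvK d h'' * (pvW d + 2) ≤ pvK d (PySem.Set.add h i) * (pvW d + 2) :=
            Nat.mul_le_mul_right _ hk''
          exact ih b h'' rest (fun x hx => hlV x (List.mem_cons_of_mem _ hx))
            (by linarith) (by linarith)

lemma pvSuffS (d : PySem.Dict Int (List Int)) (h : PySem.Set Int) (l : List Int)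
    (hl : l.length ≤ pvW d) :
    pvK d h * (pvW d + 2) + l.length + 1 ≤ pvS d := by
  have h1 := pvKleW d h
  have h2 : pvK d h * (pvW d + 2) ≤ pvW d * (pvW d + 2) := Nat.mul_le_mul_right _ h1
  simp only [pvS]
  linarith

-- ---- the dict A builds holds exactly B's predecessor lists (for keys < len) ----
-- per-iteration edge pairs (key, predecessor) that A's loop body appends
def pvG (arr : List (String × Int)) (i : Int) : List (Int × Int) :=
  (if 0 < i ∧ (PySem.List.pyGetD arr (i-1) ("", 0)).1 ≠ "jmp" then [(i, i-1)] else []) ++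
  (if (PySem.List.pyGetD arr i ("", 0)).1 = "jmp"
    then [(i + (PySem.List.pyGetD arr i ("", 0)).2, i)] else [])

lemma pvStepFold (arr : List (String × Int)) (l : List Int) :
    ∀ (d : PySem.Dict Int (List Int)),
      l.foldl (fun d i =>
        let d1 := if 0 < i ∧ (PySem.List.pyGetD arr (i-1) ("", 0)).1 ≠ "jmp"
          then d.modify i [] (fun l => l ++ [i-1]) else d
        if (PySem.List.pyGetD arr i ("", 0)).1 = "jmp"
          then d1.modify (i + (PySem.List.pyGetD arr i ("", 0)).2) [] (fun l => l ++ [i])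
          else d1) d
      = (l.flatMap (pvG arr)).foldl (fun d p => d.modify p.1 [] (fun v => v ++ [p.2])) d := by
  induction l with
  | nil => intro d; rfl
  | cons i t ih =>
    intro d
    simp only [List.foldl_cons, List.flatMap_cons, List.foldl_append]
    rw [ih]
    congr 1
    by_cases h1 : 0 < i ∧ (PySem.List.pyGetD arr (i-1) ("", 0)).1 ≠ "jmp" <;>
      by_cases h2 : (PySem.List.pyGetD arr i ("", 0)).1 = "jmp" <;>
      simp [pvG, h1, h2]

lemma pvBuild_eq_foldl (arr : List (String × Int)) :
    pvBuild arr
      = ((PySem.List.pyRange 0 (arr.length : Int) 1).flatMap (pvG arr)).foldl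
          (fun d p => d.modify p.1 [] (fun l => l ++ [p.2])) PySem.Dict.empty := by
  unfold pvBuild
  exact pvStepFold arr _ PySem.Dict.empty

lemma pvFiltPair (a b k : Int) :
    (List.filter (fun p => p.1 == k) [(a, b)]).map (fun x => x.2)
      = if a = k then [b] else [] := by
  by_cases h : a = k <;> simp [h]

lemma pvFiltPairIf (c : Prop) [Decidable c] (a b k : Int) (hak : a ≠ k) :
    ((if c then [(a, b)] else []).filter (fun p => p.1 == k)).map (fun x => x.2) = [] := by
  split <;> simp [hak]

-- per-index contributions of the two flatMap presentations
def pvCA (arr : List (String × Int)) (k i : Int) : List Int :=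
  ((pvG arr i).filter (fun p => p.1 == k)).map (·.2)
def pvCB (arr : List (String × Int)) (k i : Int) : List Int :=
  if pvDestF arr i = k then [i] else []

lemma pvCA_away (arr : List (String × Int)) (k i : Int)
    (h1 : ¬(i = k ∧ 0 < i)) (h2 : i + 1 ≠ k) : pvCA arr k i = pvCB arr k i := by
  unfold pvCA pvCB pvG pvDestF
  by_cases hf : 0 < i ∧ (PySem.List.pyGetD arr (i-1) ("", 0)).1 ≠ "jmp"
  · have hik : i ≠ k := fun he => h1 ⟨he, hf.1⟩
    by_cases hj : (PySem.List.pyGetD arr i ("", 0)).1 = "jmp" <;>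
      simp [hf, hj, hik, h2, pvFiltPair]
  · by_cases hj : (PySem.List.pyGetD arr i ("", 0)).1 = "jmp" <;>
      simp [hf, hj, h2, pvFiltPair]

lemma pvCA_mid (arr : List (String × Int)) (k : Int) (hk : 0 < k) :
    pvCA arr k (k-1) ++ pvCA arr k k = pvCB arr k (k-1) ++ pvCB arr k k := by
  have h1 : k - 1 ≠ k := by omega
  have h2 : k - 1 + 1 = k := by omega
  have h3 : ¬(k + 1 = k) := by omega
  unfold pvCA pvCB pvG pvDestF
  by_cases hj : (PySem.List.pyGetD arr (k-1) ("", 0)).1 = "jmp" <;>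
    by_cases hjk : (PySem.List.pyGetD arr k ("", 0)).1 = "jmp" <;>
    simp [hj, hjk, h2, h3, hk, pvFiltPair, pvFiltPairIf _ _ _ _ h1]

lemma pvFilter_eq_flatMap {α : Type} (l : List α) (p : α → Bool) :
    l.filter p = l.flatMap (fun x => if p x then [x] else []) := by
  induction l with
  | nil => rfl
  | cons a t ih => by_cases h : p a <;> simp [h, ih]

lemma pvAgree (arr : List (String × Int)) (k : Int) (hk : k < (arr.length : Int)) :
    (pvBuild arr).getD k [] = pvPreds arr k := by
  rw [pvBuild_eq_foldl, PySem.Dict.getD_foldl_modify_append, PySem.Dict.getD_empty,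
    List.nil_append, List.filter_flatMap, List.map_flatMap]
  unfold pvPreds
  rw [pvFilter_eq_flatMap]
  have hsel : ∀ i ∈ PySem.List.pyRange 0 (arr.length : Int) 1,
      (if (PySem.List.pyGetD (pvDest arr) i 0 == k) = true then [i] else []) = pvCB arr k i := by
    intro i hi
    obtain ⟨h0, h1⟩ := (PySem.List.mem_pyRange_one).1 hi
    unfold pvDest pvCB
    rw [PySem.List.pyGetD_map_pyRange_of_nonneg (pvDestF arr) _ i 0 h0 h1]
    simp
  rw [List.flatMap_congr hsel]
  show (PySem.List.pyRange 0 (arr.length : Int) 1).flatMap (pvCA arr k)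
      = (PySem.List.pyRange 0 (arr.length : Int) 1).flatMap (pvCB arr k)
  by_cases hk0 : 0 < k
  · have hsplit : PySem.List.pyRange 0 (arr.length : Int) 1
        = PySem.List.pyRange 0 (k-1) 1
          ++ ((k-1) :: k :: PySem.List.pyRange (k+1) (arr.length : Int) 1) := by
      rw [PySem.List.pyRange_one_append 0 (k-1) (arr.length : Int) (by omega) (by omega),
        PySem.List.pyRange_one_cons (by omega : k-1 < (arr.length : Int)),
        show k - 1 + 1 = k by omega,
        PySem.List.pyRange_one_cons (by omega : k < (arr.length : Int))]
    rw [hsplit]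
    simp only [List.flatMap_append, List.flatMap_cons]
    have hseg1 : (PySem.List.pyRange 0 (k-1) 1).flatMap (pvCA arr k)
        = (PySem.List.pyRange 0 (k-1) 1).flatMap (pvCB arr k) := by
      refine List.flatMap_congr ?_
      intro i hi
      obtain ⟨h0, h1⟩ := (PySem.List.mem_pyRange_one).1 hi
      exact pvCA_away arr k i (by omega) (by omega)
    have hseg3 : (PySem.List.pyRange (k+1) (arr.length : Int) 1).flatMap (pvCA arr k)
        = (PySem.List.pyRange (k+1) (arr.length : Int) 1).flatMap (pvCB arr k) := by
      refine List.flatMap_congr ?_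
      intro i hi
      obtain ⟨h0, h1⟩ := (PySem.List.mem_pyRange_one).1 hi
      exact pvCA_away arr k i (by omega) (by omega)
    rw [hseg1, hseg3]
    congr 1
    rw [← List.append_assoc, ← List.append_assoc, pvCA_mid arr k hk0]
  · refine List.flatMap_congr ?_
    intro i hi
    obtain ⟨h0, h1⟩ := (PySem.List.mem_pyRange_one).1 hi
    exact pvCA_away arr k i (by omega) (by omega)

-- ---- B-side universe and measure ----
def pvVB (arr : List (String × Int)) : Finset Int :=
  (PySem.List.pyRange 0 (arr.length : Int) 1).toFinset
def pvKB (arr : List (String × Int)) (h : List Int) : Nat :=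
  ((pvVB arr).filter (fun v => v ∉ h)).card

lemma pvMem_pvVB (arr : List (String × Int)) (i : Int) :
    i ∈ pvVB arr ↔ 0 ≤ i ∧ i < (arr.length : Int) := by
  simp [pvVB, PySem.List.mem_pyRange_one]

lemma pvKB_le (arr : List (String × Int)) (h : List Int) : pvKB arr h ≤ arr.length := by
  have := le_trans (Finset.card_filter_le (pvVB arr) (fun v => v ∉ h))
    (List.toFinset_card_le (PySem.List.pyRange 0 (arr.length : Int) 1))
  simpa [PySem.List.length_pyRange_one] using this

lemma pvKB_mono (arr : List (String × Int)) (d : PySem.Dict Int (List Int)) (f : Nat)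
    (h : PySem.Set Int) (l : List Int) :
    pvKB arr (pvDfs d f h l) ≤ pvKB arr h := by
  apply Finset.card_le_card
  intro v hv
  simp only [Finset.mem_filter] at hv ⊢
  exact ⟨hv.1, fun hmem => hv.2 (pvGrow d f h l v hmem)⟩

lemma pvKB_add (arr : List (String × Int)) (h : PySem.Set Int) (i : Int)
    (hiV : i ∈ pvVB arr) (hih : i ∉ h) : pvKB arr (PySem.Set.add h i) + 1 = pvKB arr h := by
  have hset : (pvVB arr).filter (fun v => v ∉ PySem.Set.add h i)
      = ((pvVB arr).filter (fun v => v ∉ h)).erase i := by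
    ext v
    simp only [Finset.mem_filter, Finset.mem_erase, PySem.Set.mem_add]
    tauto
  have hmem : i ∈ (pvVB arr).filter (fun v => v ∉ h) := by
    simp [Finset.mem_filter, hiV, hih]
  simp only [pvKB, hset]
  rw [Finset.card_erase_of_mem hmem]
  have : 0 < ((pvVB arr).filter (fun v => v ∉ h)).card := Finset.card_pos.2 ⟨i, hmem⟩
  omega

lemma pvPreds_len (arr : List (String × Int)) (k : Int) :
    (pvPreds arr k).length ≤ arr.length := by
  have := List.length_filter_le
    (fun i => PySem.List.pyGetD (pvDest arr) i 0 == k)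
    (PySem.List.pyRange 0 (arr.length : Int) 1)
  simpa [pvPreds, PySem.List.length_pyRange_one] using this

lemma pvPreds_mem (arr : List (String × Int)) (k x : Int) (hx : x ∈ pvPreds arr k) :
    0 ≤ x ∧ x < (arr.length : Int) := by
  have := List.mem_of_mem_filter hx
  exact (PySem.List.mem_pyRange_one).1 (by simpa using this)

-- invariant carried by every pending index
def pvInv (arr : List (String × Int)) (x : Int) : Prop :=
  x ∈ pvV (pvBuild arr) ∧ 0 ≤ x ∧ x < (arr.length : Int)

lemma pvInv_preds (arr : List (String × Int)) (k : Int) (hk : k < (arr.length : Int)) :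
    ∀ x ∈ pvPreds arr k, pvInv arr x := by
  intro x hx
  refine ⟨?_, pvPreds_mem arr k x hx⟩
  have := pvAgree arr k hk
  exact pvPredSubV (pvBuild arr) k x (by rw [this]; exact hx)

-- run's result does not depend on the (sufficient) fuel
lemma pvRunIrrel (arr : List (String × Int)) :
    ∀ (f₁ f₂ : Nat) (h : PySem.Set Int) (s : List Int),
      (∀ x ∈ s, pvInv arr x) →
      pvKB arr h * (arr.length + 2) + s.length + 1 ≤ f₁ →
      pvKB arr h * (arr.length + 2) + s.length + 1 ≤ f₂ →
      pvRun arr f₁ h s = pvRun arr f₂ h s := by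
  intro f₁
  induction f₁ with
  | zero => intro f₂ h s _ h1 _; exact absurd h1 (Nat.not_succ_le_zero _)
  | succ a ih =>
    intro f₂ h s hs h1 h2
    cases f₂ with
    | zero => exact absurd h2 (Nat.not_succ_le_zero _)
    | succ b =>
      cases s with
      | nil => rw [pvRun_nil, pvRun_nil]
      | cons i rest =>
        rw [pvRun_step, pvRun_step]
        simp only [List.length_cons] at h1 h2
        have hrest : ∀ x ∈ rest, pvInv arr x := fun x hx => hs x (List.mem_cons_of_mem _ hx)
        by_cases hc : PySem.Set.contains h i
        · rw [if_pos hc, if_pos hc]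
          exact ih b h rest hrest (by linarith) (by linarith)
        · rw [if_neg hc, if_neg hc]
          have hih : i ∉ h := fun hm => hc ((PySem.Set.contains_iff h i).2 hm)
          have hinv := hs i List.mem_cons_self
          have hiV : i ∈ pvVB arr := (pvMem_pvVB arr i).2 ⟨hinv.2.1, hinv.2.2⟩
          have hkb := pvKB_add arr h i hiV hih
          have hexp : pvKB arr h * (arr.length + 2)
              = pvKB arr (PySem.Set.add h i) * (arr.length + 2) + (arr.length + 2) := by
            rw [← hkb]; ring
          have hpl := pvPreds_len arr i
          have hinvs : ∀ x ∈ pvPreds arr i ++ rest, pvInv arr x := by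
            intro x hx
            rcases List.mem_append.1 hx with hx | hx
            · exact pvInv_preds arr i hinv.2.2 x hx
            · exact hrest x hx
          have hlen : (pvPreds arr i ++ rest).length ≤ arr.length + rest.length := by
            rw [List.length_append]; omega
          exact ih b _ _ hinvs (by linarith) (by linarith)

-- the flat stack machine runs A's dfs frame by frame
lemma pvBridge (arr : List (String × Int)) :
    ∀ (f : Nat) (h : PySem.Set Int) (l s : List Int),
      (∀ x ∈ l, pvInv arr x) → (∀ x ∈ s, pvInv arr x) →
      l.length ≤ pvW (pvBuild arr) →
      pvKB arr h * (arr.length + 2) + l.length + s.length + 1 ≤ f →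
      pvRun arr f h (l ++ s)
        = pvRun arr f (pvDfs (pvBuild arr) (pvFuelA (pvBuild arr)) h l) s := by
  intro f
  induction f with
  | zero => intro h l s _ _ _ hb; exact absurd hb (Nat.not_succ_le_zero _)
  | succ a ih =>
    intro h l s hl hs hlw hb
    have hFA : pvFuelA (pvBuild arr) = pvS (pvBuild arr) + 1 := by
      unfold pvFuelA pvS; omega
    cases l with
    | nil => rw [List.nil_append, pvDfs_nil]
    | cons i rest =>
      have hrest : ∀ x ∈ rest, pvInv arr x := fun x hx => hl x (List.mem_cons_of_mem _ hx)
      have hin : pvInv arr i := hl i List.mem_cons_self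
      have hrw : rest.length ≤ pvW (pvBuild arr) := by
        simp only [List.length_cons] at hlw; omega
      rw [List.cons_append, pvRun_step]
      simp only [List.length_cons] at hb
      by_cases hc : PySem.Set.contains h i
      · have hdfs : pvDfs (pvBuild arr) (pvFuelA (pvBuild arr)) h (i :: rest)
            = pvDfs (pvBuild arr) (pvFuelA (pvBuild arr)) h rest := by
          rw [hFA, pvDfs_step, if_pos hc]
          exact pvFuelIrrel (pvBuild arr) (pvS (pvBuild arr)) (pvS (pvBuild arr) + 1) h rest
            (fun x hx => (hrest x hx).1)
            (pvSuffS _ h rest hrw) (le_trans (pvSuffS _ h rest hrw) (Nat.le_succ _))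
        rw [if_pos hc, hdfs, ih h rest s hrest hs hrw (by linarith)]
        have hk' : pvKB arr (pvDfs (pvBuild arr) (pvFuelA (pvBuild arr)) h rest) ≤ pvKB arr h :=
          pvKB_mono arr _ _ _ _
        exact pvRunIrrel arr a (a+1) _ s hs
          (by have := Nat.mul_le_mul_right (arr.length + 2) hk'; linarith)
          (by have := Nat.mul_le_mul_right (arr.length + 2) hk'; linarith)
      · rw [if_neg hc]
        have hih : i ∉ h := fun hm => hc ((PySem.Set.contains_iff h i).2 hm)
        have hiV : i ∈ pvVB arr := (pvMem_pvVB arr i).2 ⟨hin.2.1, hin.2.2⟩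
        have hkb := pvKB_add arr h i hiV hih
        have hexp : pvKB arr h * (arr.length + 2)
            = pvKB arr (PySem.Set.add h i) * (arr.length + 2) + (arr.length + 2) := by
          rw [← hkb]; ring
        have hag := pvAgree arr i hin.2.2
        have hplW : (pvPreds arr i).length ≤ pvW (pvBuild arr) := by
          rw [← hag]; exact pvPredLen _ i
        have hpln := pvPreds_len arr i
        have hIpreds : ∀ x ∈ pvPreds arr i, pvInv arr x := pvInv_preds arr i hin.2.2
        have hIrs : ∀ x ∈ rest ++ s, pvInv arr x := by
          intro x hx
          rcases List.mem_append.1 hx with hx | hx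
          · exact hrest x hx
          · exact hs x hx
        rw [ih (PySem.Set.add h i) (pvPreds arr i) (rest ++ s) hIpreds hIrs hplW
          (by rw [List.length_append]; linarith)]
        set h2 := pvDfs (pvBuild arr) (pvFuelA (pvBuild arr)) (PySem.Set.add h i) (pvPreds arr i)
          with hh2
        have hk2 : pvKB arr h2 ≤ pvKB arr (PySem.Set.add h i) := pvKB_mono arr _ _ _ _
        rw [ih h2 rest s hrest hs hrw
          (by have := Nat.mul_le_mul_right (arr.length + 2) hk2; linarith)]
        have hdfs : pvDfs (pvBuild arr) (pvFuelA (pvBuild arr)) h (i :: rest)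
            = pvDfs (pvBuild arr) (pvFuelA (pvBuild arr)) h2 rest := by
          rw [hFA, pvDfs_step, if_neg hc, hag]
          have hinner : pvDfs (pvBuild arr) (pvS (pvBuild arr)) (PySem.Set.add h i) (pvPreds arr i)
              = pvDfs (pvBuild arr) (pvS (pvBuild arr) + 1) (PySem.Set.add h i) (pvPreds arr i) :=
            pvFuelIrrel _ _ _ _ _ (fun x hx => (hIpreds x hx).1)
              (pvSuffS _ _ _ hplW) (le_trans (pvSuffS _ _ _ hplW) (Nat.le_succ _))
          rw [hinner, ← hFA, ← hh2]
          exact pvFuelIrrel _ _ _ _ _ (fun x hx => (hrest x hx).1)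
            (pvSuffS _ _ _ hrw) (le_trans (pvSuffS _ _ _ hrw) (Nat.le_succ _))
        rw [hdfs]
        have hk3 : pvKB arr (pvDfs (pvBuild arr) (pvFuelA (pvBuild arr)) h2 rest) ≤ pvKB arr h2 :=
          pvKB_mono arr _ _ _ _
        exact pvRunIrrel arr a (a+1) _ s hs
          (by have h5 := Nat.mul_le_mul_right (arr.length + 2) (le_trans hk3 hk2); linarith)
          (by have h5 := Nat.mul_le_mul_right (arr.length + 2) (le_trans hk3 hk2); linarith)

-- ===== VERDICT (by name: the statement is the Claim_ definition above) =====
theorem find_happy_nodes_spec : Claim_equal_find_happy_nodes := by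
  intro arr _
  unfold Spec_find_happy_nodes find_happy_nodes find_happy_nodes_alt
  have hlt : (arr.length : Int) - 1 < (arr.length : Int) := by omega
  have hag := pvAgree arr ((arr.length : Int) - 1) hlt
  show pvDfs (pvBuild arr) (pvFuelA (pvBuild arr)) PySem.Set.empty
      ((pvBuild arr).getD ((arr.length : Int) - 1) [])
    = pvRun arr ((arr.length + 2) * (arr.length + 2)) PySem.Set.empty
      (pvPreds arr ((arr.length : Int) - 1))
  rw [hag]
  have hplW : (pvPreds arr ((arr.length : Int) - 1)).length ≤ pvW (pvBuild arr) := by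
    rw [← hag]; exact pvPredLen _ _
  have hb := pvBridge arr ((arr.length + 2) * (arr.length + 2)) PySem.Set.empty
    (pvPreds arr ((arr.length : Int) - 1)) []
    (pvInv_preds arr _ hlt) (by intro x hx; cases hx) hplW
    (by
      have h1 := pvKB_le arr PySem.Set.empty
      have h2 := pvPreds_len arr ((arr.length : Int) - 1)
      have h3 := Nat.mul_le_mul_right (arr.length + 2) h1
      simp only [List.length_nil]
      nlinarith)
  rw [List.append_nil, pvRun_nil] at hb
  exact hb.symm
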